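-- pv_equiv track=rewrite | github.com/Ilya758/leetcode-sltns | hashmap&sets/easy/countBalls.py | countBalls
-- ===== SOURCE A (Python) =====
-- from collections import defaultdict
-- from functools import reduce
--
-- def countBalls(l: int, h: int) -> int:
--     cache = defaultdict(int)
--     ans = 0
--
--     for i in range(l, h + 1):
--         key = reduce(lambda a, c: a + c, map(int, list(str(i))))
--         cache[key] += 1
--         ans = max(ans, cache[key])
--
--     return ans
-- ===== SOURCE B (Python) =====
-- def countBalls(l: int, h: int) -> int:
--     # Digit DP: count, per digit sum s, how many numbers in [0, n] have digit
--     # sum s (one row per recursion level, numbers split as i = 10*a + d);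
--     # answer = max over s of (count in [0, h]) - (count in [0, l-1]).
--     if h < l:
--         return 0
--
--     def dsum(n):
--         s = 0
--         while n > 0:
--             s += n % 10
--             n //= 10
--         return s
--
--     def prefix_row(n):
--         # row[s] == #{i in [0..n] : dsum(i) == s}; [] for n < 0
--         if n < 0:
--             return []
--         q, r = n // 10, n % 10
--         prev = prefix_row(q - 1)
--         dq = dsum(q)
--         width = max(len(prev) + 9, dq + r + 1)
--         return [sum(prev[s - d] for d in range(10) if 0 <= s - d < len(prev))
--                 + (1 if dq <= s <= dq + r else 0)
--                 for s in range(width)]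
--
--     hi = prefix_row(h)
--     lo = prefix_row(l - 1)
--     return max(hi[s] - (lo[s] if s < len(lo) else 0) for s in range(len(hi)))
-- ===== Notes on version B (the rewrite author's own statement) =====
-- stated objective: faster
-- what changed: A enumerates every number in [l,h] and digit-sums it via str(); B is a digit DP that computes, one recursion level per decimal digit, a row of counts of numbers in [0,n] per digit sum, and returns the max of the prefix-count differences for [0,h] minus [0,l-1].
-- outside the precondition, e.g. on countBalls(-3, 5): A raises ValueError, B returns 1
import Mathlib
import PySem

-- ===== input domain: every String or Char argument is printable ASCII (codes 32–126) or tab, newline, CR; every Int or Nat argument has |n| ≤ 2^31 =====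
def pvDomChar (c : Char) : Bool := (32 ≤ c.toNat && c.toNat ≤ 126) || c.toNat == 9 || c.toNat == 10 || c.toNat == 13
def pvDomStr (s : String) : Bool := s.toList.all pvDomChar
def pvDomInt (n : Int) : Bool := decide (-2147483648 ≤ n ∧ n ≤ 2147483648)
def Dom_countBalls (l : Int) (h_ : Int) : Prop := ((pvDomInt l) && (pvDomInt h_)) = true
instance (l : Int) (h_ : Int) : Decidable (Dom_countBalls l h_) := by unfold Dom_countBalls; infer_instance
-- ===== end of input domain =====

-- B replaces A's per-number enumeration of [l,h] with a digit DP over prefix counts; faster (return value only, no observable mutation).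

-- ===== PORT A =====
-- int(c) for a single character; on Pre_ (i ≥ 0) every character of str(i) is a digit.
def pvCharInt (c : Char) : Int := (PySem.Int.ofChars? [c]).getD 0

-- reduce(lambda a, c: a + c, map(int, list(str(i)))) ; the [] branch is unreachable (str(i) is never empty)
def pvKey (i : Int) : Int :=
  match (PySem.Int.toChars i).map pvCharInt with
  | [] => 0
  | x :: xs => xs.foldl (· + ·) x

def countBalls (l : Int) (h_ : Int) : Int :=
  ((PySem.List.pyRange l (h_ + 1)).foldl
    (fun st i =>
      let key := pvKey i
      let c := st.1.getD key 0 + 1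
      (st.1.insert key c, max st.2 c))
    ((PySem.Dict.empty : PySem.Dict Int Int), (0 : Int))).2

-- ===== PORT B =====
-- B's dsum: while n > 0: s += n % 10; n //= 10
def dsumI (n : Int) : Int :=
  if _h : 0 < n then PySem.Int.mod n 10 + dsumI (PySem.Int.floordiv n 10) else 0
termination_by n.toNat
decreasing_by
  rw [PySem.Int.floordiv_eq_ediv_of_pos (by norm_num)]
  omega

-- B's prefix_row: row[s] = #{i in [0..n] : dsum(i) = s}; [] for n < 0
def pvRow (n : Int) : List Int :=
  if _h : n < 0 then []
  else
    let q := PySem.Int.floordiv n 10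
    let r := PySem.Int.mod n 10
    let prev := pvRow (q - 1)
    let dq := dsumI q
    let width := max ((prev.length : Int) + 9) (dq + r + 1)
    (PySem.List.pyRange 0 width).map (fun s =>
      (((PySem.List.pyRange 0 10).filter
          (fun d => decide (0 ≤ s - d) && decide (s - d < (prev.length : Int)))).map
        (fun d => prev.getD (s - d).toNat 0)).sum
      + (if dq ≤ s ∧ s ≤ dq + r then (1 : Int) else 0))
termination_by (n + 1).toNat
decreasing_by
  rw [PySem.Int.floordiv_eq_ediv_of_pos (by norm_num)]
  omega

def countBalls_alt (l : Int) (h_ : Int) : Int :=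
  if h_ < l then 0
  else
    let hi := pvRow h_
    let lo := pvRow (l - 1)
    -- max(...) over the generator; the [] branch is unreachable in Python (hi is nonempty whenever B runs on Pre_)
    match (PySem.List.pyRange 0 (hi.length : Int)).map
        (fun s => hi.getD s.toNat 0 - if s < (lo.length : Int) then lo.getD s.toNat 0 else 0) with
    | [] => 0
    | x :: xs => xs.foldl max x

-- ===== PRECONDITION & SPEC =====
-- Pre_ excludes only inputs where A raises: a nonempty range starting below 0 makes int('-') raise ValueError.
def Pre_countBalls (l : Int) (h_ : Int) : Prop := 0 ≤ l ∨ h_ < l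
instance (l : Int) (h_ : Int) : Decidable (Pre_countBalls l h_) := by unfold Pre_countBalls; infer_instance

def pvWitness_countBalls : Int × Int := (1, 100)

def Spec_countBalls (l : Int) (h_ : Int) (out : Int) : Prop := out = countBalls_alt l h_
instance (l : Int) (h_ : Int) (out : Int) : Decidable (Spec_countBalls l h_ out) := by unfold Spec_countBalls; infer_instance

-- ===== CLAIM (what is proved, stated in full; the proofs are below) =====
def Claim_equal_countBalls : Prop := ∀ (l : Int) (h_ : Int), Dom_countBalls l h_ → Pre_countBalls l h_ → Spec_countBalls l h_ (countBalls l h_)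

-- ===== LEMMAS AND PROOFS =====

lemma dsumI_nonpos {n : Int} (h : n ≤ 0) : dsumI n = 0 := by
  rw [dsumI]; simp [not_lt.mpr h]

lemma dsumI_split {n : Int} (h : 0 ≤ n) :
    dsumI n = dsumI (PySem.Int.floordiv n 10) + PySem.Int.mod n 10 := by
  by_cases h0 : 0 < n
  · rw [dsumI, dif_pos h0]; omega
  · have hz : n = 0 := by omega
    subst hz
    rw [dsumI_nonpos le_rfl, show PySem.Int.floordiv 0 10 = 0 from by decide,
        show PySem.Int.mod 0 10 = 0 from by decide, dsumI_nonpos le_rfl]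
    norm_num

lemma dsumI_nonneg (n : Int) : 0 ≤ dsumI n := by
  by_cases h : 0 < n
  · rw [dsumI, dif_pos h]
    have h1 := dsumI_nonneg (PySem.Int.floordiv n 10)
    have h2 := PySem.Int.mod_nonneg n (b := 10) (by norm_num)
    omega
  · rw [dsumI_nonpos (by omega)]
termination_by n.toNat
decreasing_by
  rw [PySem.Int.floordiv_eq_ediv_of_pos (by norm_num)]
  omega

-- nat version recurrences
lemma dsumI_natCast_pos {m : Nat} (h : 0 < m) :
    dsumI (m : Int) = ((m % 10 : Nat) : Int) + dsumI ((m / 10 : Nat) : Int) := by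
  rw [dsumI, dif_pos (show (0:Int) < (m:Int) from by exact_mod_cast h)]
  rw [show (10:Int) = ((10:Nat):Int) from by norm_num]
  rw [PySem.Int.mod_natCast, PySem.Int.floordiv_natCast]

lemma charInt_digitChar {d : Nat} (h : d < 10) : pvCharInt (Nat.digitChar d) = d := by
  interval_cases d <;> decide

lemma toDigitsCore_ne_nil : ∀ (fuel n : Nat) (ds : List Char),
    Nat.toDigitsCore 10 fuel n ds = [] → ds = [] ∧ fuel = 0 := by
  intro fuel
  induction fuel with
  | zero => intro n ds h; simpa [Nat.toDigitsCore] using h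
  | succ f ih =>
    intro n ds h
    rw [Nat.toDigitsCore] at h
    by_cases h10 : n / 10 = 0
    · simp [h10] at h
    · simp [h10] at h
      rcases ih _ _ h with ⟨h1, _⟩
      simp at h1

lemma toDigitsCore_sum : ∀ (fuel n : Nat) (ds : List Char), n < fuel →
    ((Nat.toDigitsCore 10 fuel n ds).map pvCharInt).sum
      = dsumI (n : Int) + ((ds.map pvCharInt).sum) := by
  intro fuel
  induction fuel with
  | zero => omega
  | succ f ih =>
    intro n ds hn
    rw [Nat.toDigitsCore]
    by_cases h10 : n / 10 = 0
    · have hlt : n < 10 := by omega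
      simp only [h10, if_true, List.map_cons, List.sum_cons]
      rw [charInt_digitChar (Nat.mod_lt_of_lt hlt)]
      rcases Nat.eq_zero_or_pos n with h0 | h0
      · simp [h0, dsumI_nonpos le_rfl]
      · rw [dsumI_natCast_pos h0, h10]
        rw [show ((0:Nat):Int) = 0 from rfl, dsumI_nonpos le_rfl]
        ring
    · have hpos : 0 < n := by omega
      simp only [h10, if_false]
      rw [ih (n / 10) _ (by omega)]
      rw [dsumI_natCast_pos hpos]
      simp [charInt_digitChar (Nat.mod_lt n (by norm_num))]
      ring

lemma foldl_add_eq_sum : ∀ (xs : List Int) (x : Int), xs.foldl (· + ·) x = x + xs.sum := by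
  intro xs
  induction xs with
  | nil => simp
  | cons y ys ih => intro x; simp [List.foldl_cons, ih]; ring

lemma pvKey_eq_dsumI {i : Int} (h : 0 ≤ i) : pvKey i = dsumI i := by
  unfold pvKey
  have htc : PySem.Int.toChars i = Nat.toDigits 10 i.toNat := by
    unfold PySem.Int.toChars
    simp [not_lt.mpr h]
  have hsum := toDigitsCore_sum (i.toNat + 1) i.toNat [] (by omega)
  rw [show ((i.toNat : Int)) = i from Int.toNat_of_nonneg h] at hsum
  have hne : Nat.toDigitsCore 10 (i.toNat + 1) i.toNat [] ≠ [] := by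
    intro hcon
    rcases toDigitsCore_ne_nil _ _ _ hcon with ⟨_, h2⟩
    omega
  rcases hlist : Nat.toDigitsCore 10 (i.toNat + 1) i.toNat [] with _ | ⟨c, cs⟩
  · exact absurd hlist hne
  · rw [hlist] at hsum
    rw [htc, Nat.toDigits, hlist]
    simp only [List.map_cons, List.map_nil, List.sum_cons, List.sum_nil] at hsum
    simp only [List.map_cons]
    rw [foldl_add_eq_sum]
    omega

def pvStep (st : PySem.Dict Int Int × Int) (k : Int) : PySem.Dict Int Int × Int :=
  let c := st.1.getD k 0 + 1
  (st.1.insert k c, max st.2 c)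

def rmax (f : Nat → Int) : Nat → Int
  | 0 => 0
  | (W + 1) => max (rmax f W) (f W)

lemma rmax_eq_zero {f : Nat → Int} (hf : ∀ s, f s = 0) : ∀ W, rmax f W = 0 := by
  intro W
  induction W with
  | zero => rfl
  | succ V ih => rw [rmax, ih, hf]; simp

lemma rmax_congr {f g : Nat → Int} : ∀ {W : Nat}, (∀ j, j < W → f j = g j) → rmax f W = rmax g W := by
  intro W
  induction W with
  | zero => intro _; rfl
  | succ V ih =>
    intro h
    rw [rmax, rmax, ih (fun j hj => h j (by omega)), h V (by omega)]

lemma le_rmax {f : Nat → Int} : ∀ {W k : Nat}, k < W → f k ≤ rmax f W := by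
  intro W
  induction W with
  | zero => omega
  | succ V ih =>
    intro k hk
    rw [rmax]
    by_cases hkV : k = V
    · subst hkV; exact le_max_right _ _
    · exact le_trans (ih (by omega)) (le_max_left _ _)

lemma rmax_bump {f g : Nat → Int} {k : Nat} : ∀ {W : Nat}, k < W →
    (∀ j, j ≠ k → g j = f j) → g k = f k + 1 →
    rmax g W = max (rmax f W) (g k) := by
  intro W
  induction W with
  | zero => omega
  | succ V ih =>
    intro hk hag hgk
    rw [rmax, rmax]
    by_cases hkV : k = V
    · subst hkV
      rw [rmax_congr (fun j hj => (hag j (by omega)).symm)]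
      rw [max_assoc, max_eq_right (show f k ≤ g k by omega)]
    · have hV : g V = f V := hag V (Ne.symm (by omega))
      rw [ih (by omega) hag hgk, hV]
      have h1 := le_rmax (f := f) (k := k) (by omega)
      have h2 : g k = f k + 1 := hgk
      rcases max_cases (rmax f V) (f V) with ⟨he, _⟩ | ⟨he, _⟩ <;> omega

lemma dict_fold_getD (j : Int) : ∀ (ks : List Int),
    ((ks.foldl pvStep ((PySem.Dict.empty : PySem.Dict Int Int), (0 : Int))).1).getD j 0
      = (ks.count j : Int) := by
  intro ks
  induction ks using List.reverseRecOn with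
  | nil => simp [PySem.Dict.getD_empty, List.foldl_nil]
  | append_singleton ks k ih =>
    rw [List.foldl_append, List.foldl_cons, List.foldl_nil]
    show (((ks.foldl pvStep _).1.insert k _)).getD j 0 = _
    rw [PySem.Dict.getD_insert]
    by_cases hjk : j = k
    · subst hjk
      rw [if_pos rfl, ih, List.count_append]
      have : List.count j [j] = 1 := by simp
      rw [this]
      push_cast
      ring
    · rw [if_neg hjk, ih]
      have : List.count j [k] = 0 := List.count_eq_zero.mpr (by simp [hjk])
      rw [List.count_append, this]
      simp

lemma ans_fold_eq_rmax : ∀ (ks : List Int) (W : Nat),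
    (∀ k ∈ ks, 0 ≤ k ∧ k < (W : Int)) →
    ((ks.foldl pvStep ((PySem.Dict.empty : PySem.Dict Int Int), (0 : Int))).2)
      = rmax (fun s => ((ks.count (s : Int) : Nat) : Int)) W := by
  intro ks
  induction ks using List.reverseRecOn with
  | nil =>
    intro W _
    rw [rmax_eq_zero (by simp)]
    rfl
  | append_singleton ks k ih =>
    intro W hb
    have hk := hb k (by simp)
    have hks : ∀ k' ∈ ks, 0 ≤ k' ∧ k' < (W : Int) := fun k' hk' => hb k' (by simp [hk'])
    rw [List.foldl_append, List.foldl_cons, List.foldl_nil]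
    show max ((ks.foldl pvStep _).2) (((ks.foldl pvStep _).1).getD k 0 + 1) = _
    rw [dict_fold_getD, ih W hks]
    have hkn : ((k.toNat : Int)) = k := Int.toNat_of_nonneg hk.1
    have hkW : k.toNat < W := by omega
    rw [rmax_bump hkW (f := fun s => ((ks.count (s : Int) : Nat) : Int))
          (g := fun s => (((ks ++ [k]).count (s : Int) : Nat) : Int))
          (k := k.toNat) ?hag ?hgk]
    · show _ = max _ (((((ks ++ [k]).count ((k.toNat : Int)) : Nat)) : Int))
      rw [hkn]
      congr 1
      rw [List.count_append, show List.count k [k] = 1 from by simp]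
      push_cast
      ring
    case hag =>
      intro j hj
      have hne : (j : Int) ≠ k := by
        intro hc; apply hj; omega
      show (((ks ++ [k]).count ((j : Nat) : Int) : Nat) : Int) = _
      have h0 : List.count ((j : Nat) : Int) [k] = 0 := List.count_eq_zero.mpr (by simp [hne])
      rw [List.count_append, h0]
      simp
    case hgk =>
      show (((ks ++ [k]).count ((k.toNat : Int)) : Nat) : Int) = _
      rw [hkn, List.count_append, show List.count k [k] = 1 from by simp]
      push_cast
      simp [hkn]

def pvC (n s : Int) : Int := ((PySem.List.pyRange 0 (n + 1)).countP (fun i => dsumI i == s) : Int)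

def tenSum (q s : Int) : Int :=
  pvC q (s - 0) + pvC q (s - 1) + pvC q (s - 2) + pvC q (s - 3) + pvC q (s - 4) +
  pvC q (s - 5) + pvC q (s - 6) + pvC q (s - 7) + pvC q (s - 8) + pvC q (s - 9)

def lowCnt (dq r s : Int) : Int :=
  ((PySem.List.pyRange 0 (r + 1)).map (fun d => if dq + d = s then (1 : Int) else 0)).sum

lemma pyRange_one_nil {a b : Int} (h : b ≤ a) : PySem.List.pyRange a b = [] := by
  unfold PySem.List.pyRange
  simp [show ¬ (a < b) from by omega]

lemma pvC_neg {n : Int} (s : Int) (h : n < 0) : pvC n s = 0 := by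
  unfold pvC
  rw [pyRange_one_nil (by omega)]
  rfl

lemma pvC_succ {n s : Int} (h : 0 ≤ n) : pvC n s = pvC (n - 1) s + (if dsumI n = s then 1 else 0) := by
  unfold pvC
  rw [PySem.List.pyRange_one_succ_right h, List.countP_append]
  rw [show n - 1 + 1 = n from by ring]
  push_cast
  congr 1
  simp only [List.countP_cons, List.countP_nil, beq_iff_eq]
  split_ifs <;> simp

lemma pvC_snneg {n s : Int} (h : s < 0) : pvC n s = 0 := by
  unfold pvC
  rw [List.countP_eq_zero.mpr]
  · rfl
  · intro i _
    simp only [beq_iff_eq]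
    have := dsumI_nonneg i
    omega

lemma lowCnt_succ {dq r s : Int} (hr : 0 ≤ r) :
    lowCnt dq r s = lowCnt dq (r - 1) s + (if dq + r = s then 1 else 0) := by
  unfold lowCnt
  rw [PySem.List.pyRange_one_succ_right hr, List.map_append, List.sum_append]
  rw [show r - 1 + 1 = r from by ring]
  simp

lemma pvC_dp : ∀ n : Int, 0 ≤ n → ∀ s : Int,
    pvC n s = tenSum (PySem.Int.floordiv n 10 - 1) s
      + lowCnt (dsumI (PySem.Int.floordiv n 10)) (PySem.Int.mod n 10) s := by
  intro n hn
  induction n, hn using Int.le_induction with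
  | base =>
    intro s
    rw [show PySem.Int.floordiv 0 10 = 0 from by decide, show PySem.Int.mod 0 10 = 0 from by decide]
    unfold tenSum lowCnt
    have hz : ∀ t : Int, pvC (0 - 1) t = 0 := fun t => pvC_neg t (by norm_num)
    simp only [hz]
    rw [show (0:Int) + 1 = 1 from by norm_num,
        show PySem.List.pyRange 0 1 = [0] from by decide]
    unfold pvC
    rw [show (0:Int) + 1 = 1 from by norm_num,
        show PySem.List.pyRange 0 1 = [0] from by decide]
    simp only [List.countP_cons, List.countP_nil, List.map_cons, List.map_nil,
      List.sum_cons, List.sum_nil, dsumI_nonpos le_rfl, beq_iff_eq]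
    split_ifs <;> omega
  | succ n hn ih =>
    intro s
    have hq := PySem.Int.floordiv_mul_add_mod n 10
    have hr0 := PySem.Int.mod_nonneg n (b := 10) (by norm_num)
    have hr9 := PySem.Int.mod_lt n (b := 10) (by norm_num)
    have hq1 := PySem.Int.floordiv_mul_add_mod (n + 1) 10
    have hr10 := PySem.Int.mod_nonneg (n + 1) (b := 10) (by norm_num)
    have hr19 := PySem.Int.mod_lt (n + 1) (b := 10) (by norm_num)
    set q := PySem.Int.floordiv n 10 with hqdef
    set r := PySem.Int.mod n 10 with hrdef
    set q1 := PySem.Int.floordiv (n + 1) 10 with hq1def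
    set r1 := PySem.Int.mod (n + 1) 10 with hr1def
    have hds : dsumI (n + 1) = dsumI q1 + r1 := dsumI_split (by omega)
    have hLHS : pvC (n + 1) s = pvC n s + (if dsumI (n + 1) = s then 1 else 0) := by
      rw [pvC_succ (by omega), show n + 1 - 1 = n from by ring]
    by_cases hb : r1 = 0
    · -- n + 1 = 10 * q1, r = 9, q1 = q + 1
      have hqq : q1 = q + 1 := by omega
      have hr : r = 9 := by omega
      have ha : 0 ≤ q + 1 := by
        have := PySem.Int.floordiv_eq_ediv_of_pos (a := n) (b := 10) (by norm_num)
        omega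
      have h0q : (0:Int) ≤ q := by
        have := PySem.Int.floordiv_eq_ediv_of_pos (a := n) (b := 10) (by norm_num)
        have h2 : (0:Int) ≤ n / 10 := Int.ediv_nonneg hn (by norm_num)
        omega
      have hed : ∀ d : Int, pvC q (s - d)
          = pvC (q - 1) (s - d) + (if dsumI q + d = s then 1 else 0) := by
        intro d
        rw [pvC_succ h0q]
        congr 1
        rw [if_congr (show (dsumI q = s - d) ↔ (dsumI q + d = s) from by omega) rfl rfl]
      have hds0 : dsumI (n + 1) = dsumI (q + 1) := by rw [hds, hb, hqq]; ring
      rw [hLHS, ih s, hqq, hb, hr]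
      rw [show q + 1 - 1 = q from by ring]
      unfold tenSum
      rw [hed 0, hed 1, hed 2, hed 3, hed 4, hed 5, hed 6, hed 7, hed 8, hed 9]
      unfold lowCnt
      rw [show (9:Int) + 1 = 10 from by norm_num, show (0:Int) + 1 = 1 from by norm_num]
      rw [show PySem.List.pyRange 0 10 = [0,1,2,3,4,5,6,7,8,9] from by decide,
          show PySem.List.pyRange 0 1 = [0] from by decide]
      simp only [List.map_cons, List.map_nil, List.sum_cons, List.sum_nil, hds0]
      rw [show dsumI (q+1) + 0 = dsumI (q+1) from by ring]
      ring
    · -- same q, r1 = r + 1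
      have hqq : q1 = q := by omega
      have hr : r1 = r + 1 := by omega
      rw [hLHS, ih s, hqq]
      have hl : lowCnt (dsumI q) r1 s = lowCnt (dsumI q) r s + (if dsumI q + r1 = s then 1 else 0) := by
        rw [lowCnt_succ (by omega), hr, show r + 1 - 1 = r from by ring]
      rw [hl]
      rw [if_congr (show (dsumI (n+1) = s) ↔ (dsumI q + r1 = s) from by rw [hds, hqq]) rfl rfl]
      ring

lemma lowCnt_ite {dq s : Int} : ∀ {r : Int}, 0 ≤ r →
    lowCnt dq r s = (if dq ≤ s ∧ s ≤ dq + r then 1 else 0) := by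
  intro r hr
  induction r, hr using Int.le_induction with
  | base =>
    unfold lowCnt
    rw [show (0:Int) + 1 = 1 from by norm_num, show PySem.List.pyRange 0 1 = [0] from by decide]
    simp only [List.map_cons, List.map_nil, List.sum_cons, List.sum_nil]
    split_ifs <;> omega
  | succ r hr ih =>
    rw [lowCnt_succ (by omega), show r + 1 - 1 = r from by ring, ih]
    split_ifs <;> omega

lemma filter_map_sum (p : Int → Bool) (f : Int → Int) : ∀ xs : List Int,
    ((xs.filter p).map f).sum = (xs.map (fun d => if p d then f d else 0)).sum := by
  intro xs
  induction xs with
  | nil => rfl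
  | cons x xs ih =>
    rw [List.filter_cons, List.map_cons, List.sum_cons]
    by_cases hp : p x
    · simp only [hp, if_true, List.map_cons, List.sum_cons, ih]
    · simp only [hp, if_false, Bool.false_eq_true, ih]
      omega

lemma pvRow_nil {n : Int} (h : n < 0) : pvRow n = [] := by
  rw [pvRow, dif_pos h]

lemma pvRow_pos {n : Int} (h : ¬ n < 0) : pvRow n =
    (PySem.List.pyRange 0
        (max (((pvRow (PySem.Int.floordiv n 10 - 1)).length : Int) + 9)
             (dsumI (PySem.Int.floordiv n 10) + PySem.Int.mod n 10 + 1))).map (fun s =>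
      (((PySem.List.pyRange 0 10).filter
          (fun d => decide (0 ≤ s - d) && decide (s - d < ((pvRow (PySem.Int.floordiv n 10 - 1)).length : Int)))).map
        (fun d => (pvRow (PySem.Int.floordiv n 10 - 1)).getD (s - d).toNat 0)).sum
      + (if dsumI (PySem.Int.floordiv n 10) ≤ s ∧ s ≤ dsumI (PySem.Int.floordiv n 10) + PySem.Int.mod n 10 then (1 : Int) else 0)) := by
  rw [pvRow, dif_neg h]

lemma pvC_zero_of_big {m s : Int} (hbig : ∀ i : Int, 0 ≤ i → i ≤ m → dsumI i < s) :
    pvC m s = 0 := by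
  unfold pvC
  rw [List.countP_eq_zero.mpr]
  · rfl
  · intro i hi
    rw [PySem.List.mem_pyRange_one] at hi
    simp only [beq_iff_eq]
    have := hbig i hi.1 (by omega)
    omega

lemma pvRow_spec : ∀ (m : Nat) (n : Int), (n + 1).toNat ≤ m →
    ((∀ s : Nat, (pvRow n).getD s 0 = pvC n (s : Int)) ∧
     (∀ i : Int, 0 ≤ i → i ≤ n → dsumI i < ((pvRow n).length : Int))) := by
  intro m
  induction m with
  | zero =>
    intro n hm
    have hneg : n < 0 := by omega
    rw [pvRow_nil hneg]
    exact ⟨fun s => by simp [pvC_neg _ hneg], fun i h0 hn => by omega⟩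
  | succ m ih =>
    intro n hm
    by_cases hneg : n < 0
    · rw [pvRow_nil hneg]
      exact ⟨fun s => by simp [pvC_neg _ hneg], fun i h0 hn => by omega⟩
    · have hn0 : (0:Int) ≤ n := by omega
      have hqe := PySem.Int.floordiv_eq_ediv_of_pos (a := n) (b := 10) (by norm_num)
      have hqr := PySem.Int.floordiv_mul_add_mod n 10
      have hr0 := PySem.Int.mod_nonneg n (b := 10) (by norm_num)
      have hr9 := PySem.Int.mod_lt n (b := 10) (by norm_num)
      set q := PySem.Int.floordiv n 10 with hqdef
      set r := PySem.Int.mod n 10 with hrdef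
      have hq0 : (0:Int) ≤ q := by omega
      have hqn : q ≤ n := by omega
      obtain ⟨IH1, IH2⟩ := ih (q - 1) (by omega)
      set prev := pvRow (q - 1) with hprevdef
      set dq := dsumI q with hdqdef
      have hdq0 : 0 ≤ dq := dsumI_nonneg q
      set W := max ((prev.length : Int) + 9) (dq + r + 1) with hWdef
      have hW1 : (1:Int) ≤ W := by
        have : dq + r + 1 ≤ W := le_max_right _ _
        omega
      have hWcast : W = ((W.toNat : Nat) : Int) := (Int.toNat_of_nonneg (by omega)).symm
      have hrow : pvRow n = (List.range W.toNat).map (fun k : Nat =>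
          (((PySem.List.pyRange 0 10).filter
              (fun d => decide (0 ≤ (k:Int) - d) && decide ((k:Int) - d < (prev.length : Int)))).map
            (fun d => prev.getD ((k:Int) - d).toNat 0)).sum
          + (if dq ≤ (k:Int) ∧ (k:Int) ≤ dq + r then (1 : Int) else 0)) := by
        rw [pvRow_pos hneg, ← hqdef, ← hrdef, ← hprevdef, ← hdqdef, ← hWdef, hWcast,
            PySem.List.pyRange_zero_natCast, List.map_map]
        rfl
      have hlen : ((pvRow n).length : Int) = W := by
        rw [hrow, List.length_map, List.length_range, ← hWcast]
      have part2 : ∀ i : Int, 0 ≤ i → i ≤ n → dsumI i < ((pvRow n).length : Int) := by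
        intro i h0i hin
        rw [hlen]
        have hia := PySem.Int.floordiv_mul_add_mod i 10
        have hid0 := PySem.Int.mod_nonneg i (b := 10) (by norm_num)
        have hid9 := PySem.Int.mod_lt i (b := 10) (by norm_num)
        set a := PySem.Int.floordiv i 10 with hadef
        set d := PySem.Int.mod i 10 with hddef
        have ha0 : (0:Int) ≤ a := by
          rw [hadef, PySem.Int.floordiv_eq_ediv_of_pos (by norm_num)]
          exact Int.ediv_nonneg h0i (by norm_num)
        have haq : a ≤ q := by omega
        have hds : dsumI i = dsumI a + d := dsumI_split h0i
        by_cases hcase : a ≤ q - 1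
        · have := IH2 a ha0 hcase
          have hWge : (prev.length : Int) + 9 ≤ W := le_max_left _ _
          omega
        · have haeq : a = q := by omega
          have hdr : d ≤ r := by omega
          have hWge : dq + r + 1 ≤ W := le_max_right _ _
          rw [hds, haeq, ← hdqdef]
          omega
      refine ⟨?_, part2⟩
      intro s
      by_cases hs : s < W.toNat
      · rw [hrow, PySem.List.getD_map_range _ _ _ _ hs]
        have hdp := pvC_dp n hn0 (s : Int)
        rw [← hqdef, ← hrdef, ← hdqdef] at hdp
        rw [hdp]
        congr 1
        · -- filtered sum = tenSum (q-1) s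
          rw [filter_map_sum]
          rw [show PySem.List.pyRange 0 10 = [0,1,2,3,4,5,6,7,8,9] from by decide]
          have T : ∀ d : Int,
              (if (decide (0 ≤ (s:Int) - d) && decide ((s:Int) - d < (prev.length : Int))) = true
               then prev.getD ((s:Int) - d).toNat 0 else 0) = pvC (q - 1) ((s:Int) - d) := by
            intro d
            by_cases h1 : 0 ≤ (s:Int) - d
            · by_cases h2 : (s:Int) - d < (prev.length : Int)
              · rw [if_pos (by simp only [Bool.and_eq_true, decide_eq_true_eq]; omega)]
                have := IH1 ((s:Int) - d).toNat
                rw [Int.toNat_of_nonneg h1] at this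
                exact this
              · rw [if_neg (by simp only [Bool.and_eq_true, decide_eq_true_eq]; omega)]
                rw [pvC_zero_of_big]
                intro i h0 hle
                have := IH2 i h0 hle
                omega
            · rw [if_neg (by simp only [Bool.and_eq_true, decide_eq_true_eq]; omega)]
              rw [pvC_snneg (by omega)]
          simp only [List.map_cons, List.map_nil, List.sum_cons, List.sum_nil]
          rw [T 0, T 1, T 2, T 3, T 4, T 5, T 6, T 7, T 8, T 9]
          unfold tenSum
          ring
        · -- indicator = lowCnt
          rw [lowCnt_ite hr0]
      · rw [List.getD_eq_default]
        · rw [pvC_zero_of_big]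
          intro i h0 hle
          have := part2 i h0 hle
          rw [hlen] at this
          omega
        · rw [hrow, List.length_map, List.length_range]
          omega

lemma pyRange_split {a b c : Int} (hab : a ≤ b) (hbc : b ≤ c) :
    PySem.List.pyRange a c = PySem.List.pyRange a b ++ PySem.List.pyRange b c :=
  PySem.List.pyRange_one_append a b c hab hbc

lemma pvC_split {l h_ s : Int} (h0 : 0 ≤ l) (hlh : l ≤ h_ + 1) :
    pvC h_ s = pvC (l - 1) s + ((PySem.List.pyRange l (h_ + 1)).countP (fun i => dsumI i == s) : Int) := by
  unfold pvC
  rw [show l - 1 + 1 = l from by ring]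
  rw [pyRange_split h0 hlh, List.countP_append]
  push_cast
  ring

lemma match_fold_eq_rmax (g : Nat → Int) (W : Nat) (hW : 0 < W) (hg : ∀ s, 0 ≤ g s) :
    (match (List.range W).map g with
     | [] => (0 : Int)
     | x :: t => t.foldl max x) = rmax g W := by
  have hfold : ∀ V : Nat, rmax g V = ((List.range V).map g).foldl max 0 := by
    intro V
    induction V with
    | zero => rfl
    | succ V ih =>
      rw [rmax, List.range_succ, List.map_append, List.foldl_append, ih]
      rfl
  rcases hL : (List.range W).map g with _ | ⟨x, t⟩
  · exfalso
    have := congrArg List.length hL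
    simp at this
    omega
  · have hx : 0 ≤ x := by
      have : x ∈ (List.range W).map g := by rw [hL]; exact List.mem_cons_self
      rcases List.mem_map.mp this with ⟨s, _, hsx⟩
      rw [← hsx]; exact hg s
    rw [hfold, hL, List.foldl_cons, max_eq_right hx]

-- ===== VERDICT (by name: the statement is the Claim_ definition above) =====
theorem countBalls_spec : Claim_equal_countBalls := by
  unfold Claim_equal_countBalls
  intro l h_ _hdom hpre
  unfold Spec_countBalls
  by_cases hlt : h_ < l
  · rw [countBalls_alt, if_pos hlt]
    rw [countBalls, pyRange_one_nil (by omega), List.foldl_nil]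
  · have h0l : 0 ≤ l := by
      rcases hpre with h | h
      · exact h
      · omega
    have hlh : l ≤ h_ := by omega
    have h0h : (0:Int) ≤ h_ := by omega
    obtain ⟨S1h, S2h⟩ := pvRow_spec ((h_ + 1).toNat) h_ le_rfl
    obtain ⟨S1l, S2l⟩ := pvRow_spec ((l - 1 + 1).toNat) (l - 1) le_rfl
    set hi := pvRow h_ with hhidef
    set lo := pvRow (l - 1) with hlodef
    have hlenpos : 0 < hi.length := by
      have := S2h 0 le_rfl h0h
      by_contra hc
      rw [not_lt] at hc
      interval_cases hcl : hi.length
      · rw [dsumI_nonpos le_rfl] at this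
        simp at this
    -- the common quantity: counts of digit sums inside [l, h_]
    set gm : Nat → Int :=
      fun s => (((PySem.List.pyRange l (h_ + 1)).countP (fun i => dsumI i == (s : Int))) : Int) with hgmdef
    have hgm0 : ∀ s, 0 ≤ gm s := fun s => Int.natCast_nonneg _
    -- B side
    have hB : countBalls_alt l h_ = rmax gm hi.length := by
      rw [countBalls_alt, if_neg hlt, ← hhidef, ← hlodef]
      show (match (PySem.List.pyRange 0 ((hi.length : Int))).map
              (fun s => hi.getD s.toNat 0 - if s < (lo.length : Int) then lo.getD s.toNat 0 else 0) with
            | [] => (0:Int)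
            | x :: xs => xs.foldl max x) = rmax gm hi.length
      have hmapeq : (PySem.List.pyRange 0 (hi.length : Int)).map
            (fun s => hi.getD s.toNat 0 - if s < (lo.length : Int) then lo.getD s.toNat 0 else 0)
          = (List.range hi.length).map gm := by
        rw [PySem.List.pyRange_zero_natCast, List.map_map]
        apply List.map_congr_left
        intro s _
        show hi.getD ((s:Int)).toNat 0 - (if ((s:Int)) < (lo.length : Int) then lo.getD ((s:Int)).toNat 0 else 0) = gm s
        rw [show ((s:Int)).toNat = s from by omega]
        have hsplit := pvC_split (l := l) (h_ := h_) (s := (s:Int)) h0l (by omega)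
        have hgms : gm s = ((List.countP (fun i => dsumI i == (s:Int))
            (PySem.List.pyRange l (h_ + 1)) : Nat) : Int) := rfl
        by_cases hslo : (s:Int) < (lo.length : Int)
        · rw [if_pos hslo, S1h s, S1l s]
          omega
        · rw [if_neg hslo, S1h s]
          have hzero : pvC (l - 1) (s:Int) = 0 := by
            apply pvC_zero_of_big
            intro i hi0 hile
            have := S2l i hi0 hile
            omega
          omega
      rw [hmapeq]
      exact match_fold_eq_rmax gm hi.length hlenpos hgm0
    -- A side
    have hA : countBalls l h_ = rmax gm hi.length := by
      rw [countBalls]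
      have hstep : (fun (st : PySem.Dict Int Int × Int) (i : Int) =>
          let key := pvKey i
          let c := st.1.getD key 0 + 1
          (st.1.insert key c, max st.2 c)) = fun st i => pvStep st (pvKey i) := rfl
      rw [hstep, ← List.foldl_map]
      have hkeys : (PySem.List.pyRange l (h_ + 1)).map pvKey
          = (PySem.List.pyRange l (h_ + 1)).map dsumI := by
        apply List.map_congr_left
        intro i hi'
        rw [PySem.List.mem_pyRange_one] at hi'
        exact pvKey_eq_dsumI (by omega)
      rw [hkeys]
      rw [ans_fold_eq_rmax _ hi.length ?hbound]
      · apply rmax_congr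
        intro j _
        show (((PySem.List.pyRange l (h_ + 1)).map dsumI).count ((j:Nat) : Int) : Int) = gm j
        have hgmj : gm j = ((List.countP (fun i => dsumI i == (j:Int))
            (PySem.List.pyRange l (h_ + 1)) : Nat) : Int) := rfl
        rw [hgmj]
        congr 1
        rw [List.count_eq_countP, List.countP_map]
        rfl
      case hbound =>
        intro k hk
        rcases List.mem_map.mp hk with ⟨i, hi', hik⟩
        rw [PySem.List.mem_pyRange_one] at hi'
        constructor
        · rw [← hik]; exact dsumI_nonneg i
        · rw [← hik]
          exact S2h i (by omega) (by omega)
    rw [hA, hB]
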